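-- pv_equiv track=rewrite | github.com/gsittyz/self_study | procon/alds_1_11_d_connected_components.py | bfs
-- ===== SOURCE A (Python) =====
-- from collections import deque
--
-- def bfs(adj_list, n):
--     color = [None] * n
--     color_count = 0
--     searching = deque()
--     for i in range(n):
--         if color[i] is None:
--             color_count += 1
--             color[i] = color_count
--             searching.append(i)
--             while len(searching) > 0:
--                 start = searching.popleft()
--                 for end in adj_list[start]:
--                     if color[end] is None:
--                         color[end] = color_count
--                         searching.append(end)
--     return color
-- ===== SOURCE B (Python) =====
-- def bfs(adj_list, n):
--     color = [None] * n
--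
--     def dfs(v, c):
--         for end in adj_list[v]:
--             if color[end] is None:
--                 color[end] = c
--                 dfs(end, c)
--
--     color_count = 0
--     for i in range(n):
--         if color[i] is None:
--             color_count += 1
--             color[i] = color_count
--             dfs(i, color_count)
--     return color
-- ===== Notes on version B (the rewrite author's own statement) =====
-- stated objective: alternative
-- what changed: The deque-based breadth-first flood of each component is replaced by a recursive depth-first helper dfs(v, c); the labels are unchanged because they depend only on the increasing outer scan, not on the visit order inside a component.
-- outside the precondition, e.g. on bfs([[-1]], 1): A returns [1], B returns [1]
import Mathlib
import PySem

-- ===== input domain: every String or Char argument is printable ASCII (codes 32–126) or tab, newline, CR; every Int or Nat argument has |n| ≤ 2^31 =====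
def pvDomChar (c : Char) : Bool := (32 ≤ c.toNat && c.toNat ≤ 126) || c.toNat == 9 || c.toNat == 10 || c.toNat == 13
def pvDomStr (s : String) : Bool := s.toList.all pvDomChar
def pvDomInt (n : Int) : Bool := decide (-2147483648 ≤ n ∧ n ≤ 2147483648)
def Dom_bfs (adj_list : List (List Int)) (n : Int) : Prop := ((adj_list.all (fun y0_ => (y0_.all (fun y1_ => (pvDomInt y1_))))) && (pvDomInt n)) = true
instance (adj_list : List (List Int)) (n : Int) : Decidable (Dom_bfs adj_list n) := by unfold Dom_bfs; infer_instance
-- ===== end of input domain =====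

-- B replaces A's deque-based breadth-first flood by a recursive depth-first flood; the labels
-- depend only on the increasing outer scan, so the return value is unchanged (alternative, not faster).


-- ===== PORT A =====
-- Python's None cell is encoded as 0 (labels start at 1, so 0 never collides with a label).
-- 'if color[end] is None' / 'color[end] = color_count' go through pyGet?/pySetD; the `none`
-- (IndexError) branches skip — they are excluded by Pre_bfs.

-- number of uncolored cells: the flood's termination measure
def pvZeros (color : List Int) : Nat := color.count 0

-- position/measure facts the flood's termination argument needs

-- key: successful pyGet? gives a position; pySetD sets that position
theorem pyGetSet (xs : List Int) (e : Int) (x c : Int)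
    (h : PySem.List.pyGet? xs e = some x) :
    ∃ k : Nat, k < xs.length ∧ xs[k]? = some x ∧ PySem.List.pySetD xs e c = xs.set k c := by
  simp only [PySem.List.pyGet?, PySem.List.pySetD, PySem.List.pySet?, PySem.List.pyIdx?] at *
  split_ifs at h ⊢ with h1 h2 h3
  · exact ⟨e.toNat, by omega, by simp_all, rfl⟩
  · simp at h
  · refine ⟨xs.length - (-e).toNat, ?_, ?_, rfl⟩ <;> simp_all [List.getElem?_eq_some_iff]
    omega
  · simp at h

theorem pvZeros_set (xs : List Int) (e : Int) (c : Int) (hc : c ≠ 0)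
    (h : PySem.List.pyGet? xs e = some 0) :
    pvZeros (PySem.List.pySetD xs e c) + 1 = pvZeros xs := by
  obtain ⟨k, hk, hget, hset⟩ := pyGetSet xs e 0 c h
  have hk0 : xs[k] = 0 := by
    rw [List.getElem?_eq_some_iff] at hget; exact hget.2
  rw [hset]
  unfold pvZeros
  rw [List.count_set hk]
  simp [hk0, hc]
  have : 1 ≤ List.count 0 xs := List.one_le_count_iff.mpr (by
    exact List.mem_of_getElem hk0)
  omega


-- one BFS queue step: scan the popped vertex's row, colouring and collecting fresh vertices
def bfsExpand (c : Int) (row : List Int) (st : List Int × List Int) : List Int × List Int :=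
  row.foldl (fun st e =>
    match PySem.List.pyGet? st.1 e with
    | some v => if v = 0 then (PySem.List.pySetD st.1 e c, st.2 ++ [e]) else st
    | none => st) st

theorem bfsExpand_measure (c : Int) (hc : c ≠ 0) (row : List Int) : ∀ st : List Int × List Int,
    2 * pvZeros (bfsExpand c row st).1 + (bfsExpand c row st).2.length ≤
      2 * pvZeros st.1 + st.2.length := by
  induction row with
  | nil => intro st; simp [bfsExpand]
  | cons e row ih =>
    intro st
    have hstep : bfsExpand c (e :: row) st = bfsExpand c row
        (match PySem.List.pyGet? st.1 e with
         | some v => if v = 0 then (PySem.List.pySetD st.1 e c, st.2 ++ [e]) else st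
         | none => st) := by
      simp [bfsExpand]
    rw [hstep]
    rcases hg : PySem.List.pyGet? st.1 e with _ | v
    · simpa using ih st
    · by_cases hv : v = 0
      · subst hv
        have h1 := ih (PySem.List.pySetD st.1 e c, st.2 ++ [e])
        have h2 := pvZeros_set st.1 e c hc hg
        simp only [if_true, List.length_append, List.length_cons, List.length_nil] at h1 ⊢
        omega
      · simp only [if_neg hv]
        exact ih st


-- the 'while len(searching) > 0' loop of A (cnt is the label counter BEFORE the += 1)
def bfsLoop (adj : List (List Int)) (cnt : Nat) (q : List Int) (color : List Int) : List Int :=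
  match q with
  | [] => color
  | s :: q' =>
    let p := bfsExpand ((cnt : Int) + 1) ((PySem.List.pyGet? adj s).getD []) (color, [])
    bfsLoop adj cnt (q' ++ p.2) p.1
termination_by 2 * pvZeros color + q.length
decreasing_by
  have h := bfsExpand_measure ((cnt : Int) + 1) (by omega)
      ((PySem.List.pyGet? adj s).getD []) (color, [])
  simp only [List.length_append, List.length_cons, List.length_nil] at *
  omega

-- the 'for i in range(n)' loop of A
def bfsOuter (adj : List (List Int)) : List Int → List Int → Nat → List Int
  | [], color, _ => color
  | i :: is, color, cnt =>
    if PySem.List.pyGetD color i 0 = 0 then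
      bfsOuter adj is (bfsLoop adj cnt [i] (PySem.List.pySetD color i ((cnt : Int) + 1))) (cnt + 1)
    else bfsOuter adj is color cnt

def bfs (adj_list : List (List Int)) (n : Int) : List Int :=
  bfsOuter adj_list (PySem.List.pyRange 0 n 1) (List.replicate n.toNat 0) 0

-- ===== PORT B =====
-- transliteration of Source B: the recursive helper dfs(v, c); its body is the 'for end in adj_list[v]'
-- scan, so dfsGo recurses over the pending neighbour list es.  fuel only makes the recursion
-- well-founded: it is n (≥ the number of uncolored cells at every call), so the 0 branch is never hit.
def dfsGo (adj : List (List Int)) (c : Int) : Nat → List Int → List Int → List Int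
  | _, [], color => color
  | fuel, e :: rest, color =>
    match PySem.List.pyGet? color e with
    | some v =>
      if v = 0 then
        match fuel with
        | 0 => color
        | f + 1 =>
          dfsGo adj c f rest
            (dfsGo adj c f ((PySem.List.pyGet? adj e).getD []) (PySem.List.pySetD color e c))
      else dfsGo adj c fuel rest color
    | none => dfsGo adj c fuel rest color
termination_by fuel es _ => (fuel, es.length)

-- the 'for i in range(n)' loop of Source B ('dfs(i, color_count)' starts scanning adj_list[i])
def bfsAltOuter (adj : List (List Int)) (n : Int) : List Int → List Int → Nat → List Int
  | [], color, _ => color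
  | i :: is, color, cnt =>
    if PySem.List.pyGetD color i 0 = 0 then
      bfsAltOuter adj n is
        (dfsGo adj ((cnt : Int) + 1) n.toNat ((PySem.List.pyGet? adj i).getD [])
          (PySem.List.pySetD color i ((cnt : Int) + 1)))
        (cnt + 1)
    else bfsAltOuter adj n is color cnt

def bfs_alt (adj_list : List (List Int)) (n : Int) : List Int :=
  bfsAltOuter adj_list n (PySem.List.pyRange 0 n 1) (List.replicate n.toNat 0) 0

-- ===== PRECONDITION & SPEC =====
-- Pre_ admits n ≤ 0 (A returns []) and otherwise requires n ≤ len(adj_list) with every entry of the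
-- first n rows in [0, n): on any other input A raises IndexError, except entries in [-n, 0), which
-- Python resolves by negative-index wraparound — accidental aliasing (the same colour cell served by
-- a different adjacency row) that we exclude rather than specify.
def Pre_bfs (adj_list : List (List Int)) (n : Int) : Prop :=
  n ≤ 0 ∨ (n ≤ (adj_list.length : Int) ∧
    ∀ row ∈ adj_list.take n.toNat, ∀ e ∈ row, 0 ≤ e ∧ e < n)
instance (adj_list : List (List Int)) (n : Int) : Decidable (Pre_bfs adj_list n) := by
  unfold Pre_bfs; infer_instance
def pvWitness_bfs : List (List Int) × Int := ([[1], [0], []], 3)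
def Spec_bfs (adj_list : List (List Int)) (n : Int) (out : List Int) : Prop := out = bfs_alt adj_list n
instance (adj_list : List (List Int)) (n : Int) (out : List Int) : Decidable (Spec_bfs adj_list n out) := by unfold Spec_bfs; infer_instance

-- ===== CLAIM (what is proved, stated in full; the proofs are below) =====
def Claim_equal_bfs : Prop := ∀ (adj_list : List (List Int)) (n : Int), Dom_bfs adj_list n → Pre_bfs adj_list n → Spec_bfs adj_list n (bfs adj_list n)

-- ===== LEMMAS AND PROOFS =====

-- vertices coloured by a flood started from candidate list W on colour state `color`:
-- an uncoloured candidate, or an uncoloured neighbour of an already-flooded vertex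
inductive Rch (adj : List (List Int)) (color : List Int) (W : List Int) : Int → Prop
  | base (e : Int) : e ∈ W → PySem.List.pyGet? color e = some 0 → Rch adj color W e
  | step (v e : Int) : Rch adj color W v → e ∈ (PySem.List.pyGet? adj v).getD [] →
      PySem.List.pyGet? color e = some 0 → Rch adj color W e

-- what any flood from W computes: cells reached by Rch get c, the rest keep their colour
def FloodSpec (adj : List (List Int)) (c : Int) (color W out : List Int) : Prop :=
  out.length = color.length ∧ ∀ j : Nat, j < color.length →
    (Rch adj color W (j : Int) → out[j]? = some c) ∧
    (¬ Rch adj color W (j : Int) → out[j]? = color[j]?)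

def GoodW (n : Int) (W : List Int) : Prop := ∀ e ∈ W, 0 ≤ e ∧ e < n

def GoodAdj (adj : List (List Int)) (n : Int) : Prop :=
  n ≤ (adj.length : Int) ∧ ∀ row ∈ adj.take n.toNat, ∀ e ∈ row, 0 ≤ e ∧ e < n

-- ---- basic facts about Rch and the colour state ----

theorem Rch_uncolored {adj : List (List Int)} {color W : List Int} {x : Int} (hx : Rch adj color W x) :
    PySem.List.pyGet? color x = some 0 := by
  cases hx with
  | base _ _ h => exact h
  | step _ _ _ _ h => exact h

theorem Rch_nil {adj : List (List Int)} {color : List Int} {x : Int} (hx : Rch adj color [] x) : False := by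
  induction hx with
  | base e he _ => simp at he
  | step v e _ _ _ ih => exact ih

theorem Rch_mono {adj : List (List Int)} {color W W' : List Int} (hW : ∀ y, y ∈ W → y ∈ W') {x : Int}
    (hx : Rch adj color W x) : Rch adj color W' x := by
  induction hx with
  | base e he h => exact Rch.base e (hW e he) h
  | step v e _ hm h ih => exact Rch.step v e ih hm h

theorem Rch_congr {adj : List (List Int)} {color W W' : List Int} (hW : ∀ y, y ∈ W ↔ y ∈ W') {x : Int} :
    Rch adj color W x ↔ Rch adj color W' x :=
  ⟨Rch_mono (fun y hy => (hW y).1 hy), Rch_mono (fun y hy => (hW y).2 hy)⟩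

-- adjacency rows of in-range vertices are in-range candidate lists
theorem goodAdj_nbrs {adj : List (List Int)} {n v : Int} (ha : GoodAdj adj n)
    (h0 : 0 ≤ v) (h1 : v < n) : GoodW n ((PySem.List.pyGet? adj v).getD []) := by
  obtain ⟨hn, hrows⟩ := ha
  have hv : v.toNat < adj.length := by omega
  have hvlt : v < (adj.length : Int) := by omega
  have hg : PySem.List.pyGet? adj v = some adj[v.toNat] := by
    simp [PySem.List.pyGet?, PySem.List.pyIdx?, h0, hvlt, List.getElem?_eq_some_iff, hv]
  rw [hg]
  intro e he
  refine hrows adj[v.toNat] ?_ e he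
  have hlt : v.toNat < (adj.take n.toNat).length := by
    simp only [List.length_take]
    omega
  have hmem := List.getElem_mem hlt
  rwa [List.getElem_take] at hmem

theorem Rch_range {adj : List (List Int)} {n : Int} {color W : List Int} {x : Int}
    (ha : GoodAdj adj n) (hW : GoodW n W) (hx : Rch adj color W x) : 0 ≤ x ∧ x < n := by
  induction hx with
  | base e he _ => exact hW e he
  | step v e _ hm _ ih => exact goodAdj_nbrs ha ih.1 ih.2 e hm

-- uncoloured count never grows under a flood, and bounds fuel
theorem pvZeros_le_length (l : List Int) : pvZeros l ≤ l.length := List.count_le_length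

theorem pvZeros_pos {color : List Int} {e : Int}
    (h : PySem.List.pyGet? color e = some 0) : 1 ≤ pvZeros color := by
  obtain ⟨k, hk, hget, -⟩ := pyGetSet color e 0 0 h
  have : (0:Int) ∈ color := by
    rw [List.getElem?_eq_some_iff] at hget
    exact hget.2 ▸ List.getElem_mem hk
  exact List.one_le_count_iff.mpr this

theorem floodSpec_zeros {adj : List (List Int)} {c : Int} {color W out : List Int}
    (hc : c ≠ 0) (h : FloodSpec adj c color W out) : pvZeros out ≤ pvZeros color := by
  obtain ⟨hlen, hcell⟩ := h
  have key : ∀ j, j < color.length → out[j]? = color[j]? ∨ out[j]? = some c := by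
    intro j hj
    by_cases hr : Rch adj color W (j : Int)
    · exact Or.inr ((hcell j hj).1 hr)
    · exact Or.inl ((hcell j hj).2 hr)
  clear hcell
  -- count 0 pointwise
  unfold pvZeros
  induction color generalizing out with
  | nil => cases out <;> simp_all
  | cons a t ih =>
    cases out with
    | nil => simp at hlen
    | cons b t' =>
      have h0 := key 0 (by simp)
      simp only [List.getElem?_cons_zero] at h0
      have ht : List.count 0 t' ≤ List.count 0 t := by
        refine ih (by simpa using hlen) ?_
        intro j hj
        have := key (j+1) (by simpa using Nat.succ_lt_succ hj)
        simpa using this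
      rcases h0 with h0 | h0 <;>
        · have hb : b = a ∨ (b = c ∧ b ≠ 0) := by
            first
            | exact Or.inl (by simpa using h0)
            | exact Or.inr ⟨by simpa using h0, by simp_all⟩
          rcases hb with hb | ⟨hb, hb0⟩
          · subst hb; simp [List.count_cons]; omega
          · subst hb; simp [List.count_cons, hb0]; omega

-- a colour state that paints exactly `new` keeps exactly the other cells' colours
theorem paint_uncolored_iff {c : Int} (hc : c ≠ 0) {color color₁ new : List Int}
    (hlen₁ : color₁.length = color.length)
    (hpaint : ∀ j : Nat, j < color.length → (((j : Nat) : Int) ∈ new → color₁[j]? = some c) ∧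
      (((j : Nat) : Int) ∉ new → color₁[j]? = color[j]?))
    {x : Int} (h0 : 0 ≤ x) :
    PySem.List.pyGet? color₁ x = some 0 ↔
      (PySem.List.pyGet? color x = some 0 ∧ x ∉ new) := by
  rw [PySem.List.pyGet?_of_nonneg color₁ h0, PySem.List.pyGet?_of_nonneg color h0]
  by_cases hj : x.toNat < color.length
  · have hp := hpaint x.toNat hj
    have hx : ((x.toNat : Nat) : Int) = x := by omega
    rw [hx] at hp
    by_cases hm : x ∈ new
    · rw [hp.1 hm]
      simp [hm, hc]
    · rw [hp.2 hm]
      simp [hm]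
  · have e₁ : color₁[x.toNat]? = none := by rw [List.getElem?_eq_none_iff]; omega
    have e₂ : color[x.toNat]? = none := by rw [List.getElem?_eq_none_iff]; omega
    simp [e₁, e₂]

-- the core exchange: flooding from row ++ W equals painting the fresh row cells `new`
-- and then flooding from W together with the neighbours of `new`
theorem batch_visit {adj : List (List Int)} {n c : Int} {color color₁ row new W : List Int}
    (hc : c ≠ 0) (ha : GoodAdj adj n)
    (hrow : GoodW n row) (hW : GoodW n W) (hnew : GoodW n new)
    (hlen₁ : color₁.length = color.length)
    (hmem : ∀ x, x ∈ new ↔ (x ∈ row ∧ PySem.List.pyGet? color x = some 0))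
    (hpaint : ∀ j : Nat, j < color.length → (((j : Nat) : Int) ∈ new → color₁[j]? = some c) ∧
      (((j : Nat) : Int) ∉ new → color₁[j]? = color[j]?)) :
    ∀ x : Int, Rch adj color (row ++ W) x ↔
      (x ∈ new ∨ Rch adj color₁
        (W ++ new.flatMap (fun v => (PySem.List.pyGet? adj v).getD [])) x) := by
  have huncol : ∀ x : Int, 0 ≤ x →
      (PySem.List.pyGet? color₁ x = some 0 ↔
        (PySem.List.pyGet? color x = some 0 ∧ x ∉ new)) :=
    fun x h0 => paint_uncolored_iff hc hlen₁ hpaint h0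
  have hRW : GoodW n (row ++ W) := by
    intro y hy; rcases List.mem_append.mp hy with hy | hy
    · exact hrow y hy
    · exact hW y hy
  have hWf : GoodW n (W ++ new.flatMap (fun v => (PySem.List.pyGet? adj v).getD [])) := by
    intro y hy; rcases List.mem_append.mp hy with hy | hy
    · exact hW y hy
    · obtain ⟨v, hv, hyv⟩ := List.mem_flatMap.mp hy
      exact goodAdj_nbrs ha (hnew v hv).1 (hnew v hv).2 y hyv
  intro x
  constructor
  · intro h
    induction h with
    | base y hy hu =>
      rcases List.mem_append.mp hy with hy | hy
      · exact Or.inl ((hmem y).mpr ⟨hy, hu⟩)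
      · by_cases hn' : y ∈ new
        · exact Or.inl hn'
        · exact Or.inr (Rch.base y (List.mem_append.mpr (Or.inl hy))
            ((huncol y (hW y hy).1).mpr ⟨hu, hn'⟩))
    | step v e hv he hu ih =>
      by_cases hn' : e ∈ new
      · exact Or.inl hn'
      · have hvr := Rch_range ha hRW hv
        have her := goodAdj_nbrs ha hvr.1 hvr.2 e he
        have hu₁ : PySem.List.pyGet? color₁ e = some 0 := (huncol e her.1).mpr ⟨hu, hn'⟩
        rcases ih with hvnew | hvr'
        · exact Or.inr (Rch.base e
            (List.mem_append.mpr (Or.inr (List.mem_flatMap.mpr ⟨v, hvnew, he⟩))) hu₁)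
        · exact Or.inr (Rch.step v e hvr' he hu₁)
  · intro h
    rcases h with hnew' | h
    · have h' := (hmem x).mp hnew'
      exact Rch.base x (List.mem_append.mpr (Or.inl h'.1)) h'.2
    · induction h with
      | base y hy hu =>
        have h0y : 0 ≤ y := (hWf y hy).1
        have hu₀ := (huncol y h0y).mp hu
        rcases List.mem_append.mp hy with hy | hy
        · exact Rch.base y (List.mem_append.mpr (Or.inr hy)) hu₀.1
        · obtain ⟨v, hvnew, hyv⟩ := List.mem_flatMap.mp hy
          have hv' := (hmem v).mp hvnew
          exact Rch.step v y (Rch.base v (List.mem_append.mpr (Or.inl hv'.1)) hv'.2) hyv hu₀.1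
      | step v e hv he hu ih =>
        have hvr := Rch_range ha hWf hv
        have her := goodAdj_nbrs ha hvr.1 hvr.2 e he
        exact Rch.step v e ih he ((huncol e her.1).mp hu).1

-- mid holds the colours after the W₁ flood: its uncoloured cells are the uncoloured,
-- not-W₁-reachable cells of color
theorem flood_uncolored_iff {adj : List (List Int)} {c : Int} {color mid W₁ : List Int}
    (hc : c ≠ 0) (hspec : FloodSpec adj c color W₁ mid) {x : Int} (h0 : 0 ≤ x) :
    PySem.List.pyGet? mid x = some 0 ↔
      (PySem.List.pyGet? color x = some 0 ∧ ¬ Rch adj color W₁ x) := by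
  obtain ⟨hlen, hcell⟩ := hspec
  rw [PySem.List.pyGet?_of_nonneg mid h0, PySem.List.pyGet?_of_nonneg color h0]
  by_cases hj : x.toNat < color.length
  · have hp := hcell x.toNat hj
    have hx : ((x.toNat : Nat) : Int) = x := by omega
    rw [hx] at hp
    by_cases hr : Rch adj color W₁ x
    · rw [hp.1 hr]
      simp [hr, hc]
    · rw [hp.2 hr]
      simp [hr]
  · have e₁ : mid[x.toNat]? = none := by rw [List.getElem?_eq_none_iff]; omega
    have e₂ : color[x.toNat]? = none := by rw [List.getElem?_eq_none_iff]; omega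
    simp [e₁, e₂]

-- flooding W₁ ++ W₂ = flooding W₁, then flooding W₂ on the result
theorem comp_iff {adj : List (List Int)} {n c : Int} {color mid W₁ W₂ : List Int}
    (hc : c ≠ 0) (ha : GoodAdj adj n) (h1 : GoodW n W₁) (h2 : GoodW n W₂)
    (hspec : FloodSpec adj c color W₁ mid) :
    ∀ x : Int, Rch adj color (W₁ ++ W₂) x ↔ (Rch adj color W₁ x ∨ Rch adj mid W₂ x) := by
  have h12 : GoodW n (W₁ ++ W₂) := by
    intro y hy; rcases List.mem_append.mp hy with hy | hy
    · exact h1 y hy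
    · exact h2 y hy
  intro x
  constructor
  · intro h
    induction h with
    | base y hy hu =>
      rcases List.mem_append.mp hy with hy | hy
      · exact Or.inl (Rch.base y hy hu)
      · by_cases hr : Rch adj color W₁ y
        · exact Or.inl hr
        · exact Or.inr (Rch.base y hy
            ((flood_uncolored_iff hc hspec (h2 y hy).1).mpr ⟨hu, hr⟩))
    | step v e hv he hu ih =>
      by_cases hr : Rch adj color W₁ e
      · exact Or.inl hr
      · have hvr := Rch_range ha h12 hv
        have her := goodAdj_nbrs ha hvr.1 hvr.2 e he
        rcases ih with ih | ih
        · exact absurd (Rch.step v e ih he hu) hr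
        · exact Or.inr (Rch.step v e ih he
            ((flood_uncolored_iff hc hspec her.1).mpr ⟨hu, hr⟩))
  · intro h
    rcases h with h | h
    · exact Rch_mono (fun y hy => List.mem_append.mpr (Or.inl hy)) h
    · induction h with
      | base y hy hu =>
        have hu₀ := (flood_uncolored_iff hc hspec (h2 y hy).1).mp hu
        exact Rch.base y (List.mem_append.mpr (Or.inr hy)) hu₀.1
      | step v e hv he hu ih =>
        have hvr := Rch_range ha h2 hv
        have her := goodAdj_nbrs ha hvr.1 hvr.2 e he
        exact Rch.step v e ih he
          ((flood_uncolored_iff hc hspec her.1).mp hu).1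

theorem floodSpec_congr {adj : List (List Int)} {c : Int} {color W W' out : List Int}
    (hiff : ∀ x : Int, Rch adj color W x ↔ Rch adj color W' x) :
    FloodSpec adj c color W out → FloodSpec adj c color W' out := by
  intro ⟨hlen, hcell⟩
  refine ⟨hlen, fun j hj => ⟨fun hr => (hcell j hj).1 ((hiff j).mpr hr),
    fun hr => (hcell j hj).2 (fun hr' => hr ((hiff j).mp hr'))⟩⟩

theorem pyGet?_setD_ne {color : List Int} {e x c : Int} (he : 0 ≤ e) (hx : 0 ≤ x)
    (hne : x ≠ e) :
    PySem.List.pyGet? (PySem.List.pySetD color e c) x = PySem.List.pyGet? color x := by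
  rw [PySem.List.pySetD_of_nonneg color c he, PySem.List.pyGet?_of_nonneg _ hx,
    PySem.List.pyGet?_of_nonneg _ hx, List.getElem?_set_ne (by omega)]

theorem bfsExpand_spec {n c : Int} (hc : c ≠ 0) :
    ∀ (row color acc : List Int), GoodW n row →
    ∃ new : List Int,
      (bfsExpand c row (color, acc)).2 = acc ++ new ∧
      (∀ x : Int, x ∈ new ↔ (x ∈ row ∧ PySem.List.pyGet? color x = some 0)) ∧
      GoodW n new ∧
      (bfsExpand c row (color, acc)).1.length = color.length ∧
      (∀ j : Nat, j < color.length →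
        (((j : Nat) : Int) ∈ new → (bfsExpand c row (color, acc)).1[j]? = some c) ∧
        (((j : Nat) : Int) ∉ new → (bfsExpand c row (color, acc)).1[j]? = color[j]?)) := by
  intro row
  induction row with
  | nil =>
    intro color acc _
    exact ⟨[], by simp [bfsExpand], by simp, by intro x hx; simp at hx, by simp [bfsExpand],
      by intro j hj; simp [bfsExpand]⟩
  | cons e row ih =>
    intro color acc hrow
    have hrow' : GoodW n row := fun x hx => hrow x (List.mem_cons_of_mem e hx)
    have he : 0 ≤ e := (hrow e List.mem_cons_self).1
    have hstep : ∀ st : List Int × List Int, bfsExpand c (e :: row) st = bfsExpand c row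
        (match PySem.List.pyGet? st.1 e with
         | some v => if v = 0 then (PySem.List.pySetD st.1 e c, st.2 ++ [e]) else st
         | none => st) := by
      intro st; simp [bfsExpand]
    rcases hg : PySem.List.pyGet? color e with _ | v
    · -- IndexError branch: skipped (outside Pre_, but the lemma holds)
      obtain ⟨new, h2, hmem, hgood, hlen, hpaint⟩ := ih color acc hrow'
      refine ⟨new, ?_, ?_, hgood, ?_, ?_⟩ <;>
        first
        | (rw [hstep]; simp only [hg]; assumption)
        | (intro x
           rw [hmem x]
           constructor
           · exact fun ⟨h1, h2⟩ => ⟨List.mem_cons_of_mem e h1, h2⟩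
           · rintro ⟨h1, h2⟩
             rcases List.mem_cons.mp h1 with rfl | h1
             · rw [hg] at h2; cases h2
             · exact ⟨h1, h2⟩)
    · by_cases hv : v = 0
      · subst hv
        -- visit e
        have hel : e.toNat < color.length := by
          rw [PySem.List.pyGet?_of_nonneg color he] at hg
          have := List.getElem?_eq_some_iff.mp hg
          exact this.1
        obtain ⟨new', h2, hmem, hgood, hlen, hpaint⟩ :=
          ih (PySem.List.pySetD color e c) (acc ++ [e]) hrow'
        have hlenset : (PySem.List.pySetD color e c).length = color.length :=
          PySem.List.length_pySetD color e c
        refine ⟨e :: new', ?_, ?_, ?_, ?_, ?_⟩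
        · rw [hstep]; simp only [hg, if_true]
          rw [h2, List.append_assoc, List.singleton_append]
        · intro x
          by_cases hxe : x = e
          · subst hxe
            simp [hg]
          · have hiff := hmem x
            constructor
            · intro hx
              rcases List.mem_cons.mp hx with rfl | hx
              · exact absurd rfl hxe
              · have := (hiff.mp hx)
                have hx0 : 0 ≤ x := (hrow' x this.1).1
                have h2' := this.2
                rw [pyGet?_setD_ne he hx0 hxe] at h2'
                exact ⟨List.mem_cons_of_mem e this.1, h2'⟩
            · rintro ⟨hx1, hx2⟩
              rcases List.mem_cons.mp hx1 with rfl | hx1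
              · exact absurd rfl hxe
              · have hx0 : 0 ≤ x := (hrow' x hx1).1
                exact List.mem_cons_of_mem e
                  (hiff.mpr ⟨hx1, by rwa [pyGet?_setD_ne he hx0 hxe]⟩)
        · intro x hx
          rcases List.mem_cons.mp hx with rfl | hx
          · exact hrow x List.mem_cons_self
          · exact hgood x hx
        · rw [hstep]; simp only [hg, if_true]
          rw [hlen, hlenset]
        · intro j hj
          rw [hstep]; simp only [hg, if_true]
          have hj' : j < (PySem.List.pySetD color e c).length := by rw [hlenset]; exact hj
          constructor
          · intro hjm
            rcases List.mem_cons.mp hjm with hje | hjm'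
            · by_cases hjn : ((j : Nat) : Int) ∈ new'
              · exact (hpaint j hj').1 hjn
              · rw [(hpaint j hj').2 hjn]
                have hjeq : j = e.toNat := by omega
                subst hjeq
                rw [PySem.List.pySetD_of_nonneg color c he]
                exact List.getElem?_set_self hel
            · exact (hpaint j hj').1 hjm'
          · intro hjm
            have hjn : ((j : Nat) : Int) ∉ new' := fun h => hjm (List.mem_cons_of_mem e h)
            have hje : ((j : Nat) : Int) ≠ e := fun h => hjm (h ▸ List.mem_cons_self)
            rw [(hpaint j hj').2 hjn, PySem.List.pySetD_of_nonneg color c he,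
              List.getElem?_set_ne (by omega)]
      · -- e already coloured
        obtain ⟨new, h2, hmem, hgood, hlen, hpaint⟩ := ih color acc hrow'
        refine ⟨new, ?_, ?_, hgood, ?_, ?_⟩ <;>
          first
          | (rw [hstep]; simp only [hg, if_neg hv]; assumption)
          | (intro x
             rw [hmem x]
             constructor
             · exact fun ⟨h1, h2⟩ => ⟨List.mem_cons_of_mem e h1, h2⟩
             · rintro ⟨h1, h2⟩
               rcases List.mem_cons.mp h1 with rfl | h1
               · rw [hg] at h2
                 exact absurd (Option.some.inj h2) hv

               · exact ⟨h1, h2⟩)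

theorem Rch_drop {adj : List (List Int)} {color W : List Int} {e : Int}
    (he : PySem.List.pyGet? color e ≠ some 0) :
    ∀ x : Int, Rch adj color (e :: W) x ↔ Rch adj color W x := by
  intro x
  constructor
  · intro h
    induction h with
    | base y hy hu =>
      rcases List.mem_cons.mp hy with rfl | hy
      · exact absurd hu he
      · exact Rch.base y hy hu
    | step v e' hv hm hu ih => exact Rch.step v e' ih hm hu
  · exact Rch_mono (fun y hy => List.mem_cons_of_mem e hy)

theorem bfsLoop_spec (adj : List (List Int)) (n : Int) (cnt : Nat) (ha : GoodAdj adj n) :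
    ∀ (q color : List Int), color.length = n.toNat → GoodW n q →
    FloodSpec adj ((cnt : Int) + 1) color
      (q.flatMap (fun s => (PySem.List.pyGet? adj s).getD []))
      (bfsLoop adj cnt q color) := by
  intro q color
  induction q, color using bfsLoop.induct adj cnt with
  | case1 color =>
    intro hlen hq
    rw [bfsLoop]
    refine ⟨rfl, fun j hj => ⟨fun hr => ?_, fun _ => rfl⟩⟩
    simp only [List.flatMap_nil] at hr
    exact (Rch_nil hr).elim
  | case2 color s q' p ih =>
    intro hlen hq
    have hc : ((cnt : Int) + 1) ≠ 0 := by omega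
    have hs := hq s List.mem_cons_self
    have hrow : GoodW n ((PySem.List.pyGet? adj s).getD []) := goodAdj_nbrs ha hs.1 hs.2
    obtain ⟨new, h2, hmem, hgood, hlenp, hpaint⟩ :=
      bfsExpand_spec (n := n) hc ((PySem.List.pyGet? adj s).getD []) color [] hrow
    have hp : p = bfsExpand ((cnt : Int) + 1) ((PySem.List.pyGet? adj s).getD []) (color, []) := rfl
    have h2' : p.2 = new := by rw [hp]; simpa using h2
    have hq' : GoodW n (q' ++ p.2) := by
      intro y hy
      rcases List.mem_append.mp hy with hy | hy
      · exact hq y (List.mem_cons_of_mem s hy)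
      · rw [h2'] at hy; exact hgood y hy
    have hspec' := ih (by rw [hlenp]; exact hlen) hq'
    have hQ : GoodW n (q'.flatMap (fun s => (PySem.List.pyGet? adj s).getD [])) := by
      intro y hy
      obtain ⟨v, hv, hyv⟩ := List.mem_flatMap.mp hy
      have hv' := hq v (List.mem_cons_of_mem s hv)
      exact goodAdj_nbrs ha hv'.1 hv'.2 y hyv
    have hbatch := batch_visit (c := (cnt : Int) + 1) hc ha hrow hQ hgood hlenp hmem hpaint
    -- the recursive call's candidate list is the same
    have hcand : (q' ++ p.2).flatMap (fun s => (PySem.List.pyGet? adj s).getD []) =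
        q'.flatMap (fun s => (PySem.List.pyGet? adj s).getD []) ++
          new.flatMap (fun v => (PySem.List.pyGet? adj v).getD []) := by
      rw [h2', List.flatMap_append]
    rw [hcand] at hspec'
    rw [bfsLoop]
    obtain ⟨hlen', hcell'⟩ := hspec'
    refine ⟨by rw [hlen', hlenp], fun j hj => ⟨fun hr => ?_, fun hr => ?_⟩⟩
    · have hj' : j < p.1.length := by rwa [hlenp]
      simp only [List.flatMap_cons] at hr
      rcases (hbatch (j : Int)).mp hr with hjn | hjr
      · -- freshly painted cell: the recursive flood does not recolour it
        have hpj : p.1[j]? = some ((cnt : Int) + 1) := (hpaint j hj).1 hjn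
        have hnr : ¬ Rch adj p.1
            (q'.flatMap (fun s => (PySem.List.pyGet? adj s).getD []) ++
              new.flatMap (fun v => (PySem.List.pyGet? adj v).getD [])) (j : Int) := by
          intro hr'
          have := Rch_uncolored hr'
          rw [PySem.List.pyGet?_of_nonneg p.1 (by omega)] at this
          simp only [Int.toNat_natCast] at this
          rw [hpj] at this
          exact hc (Option.some.inj this)
        rw [(hcell' j hj').2 hnr]
        exact hpj
      · exact (hcell' j hj').1 hjr
    · simp only [List.flatMap_cons] at hr
      have hn1 : ((j : Nat) : Int) ∉ new := fun h => hr ((hbatch (j : Int)).mpr (Or.inl h))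
      have hn2 : ¬ Rch adj p.1
          (q'.flatMap (fun s => (PySem.List.pyGet? adj s).getD []) ++
            new.flatMap (fun v => (PySem.List.pyGet? adj v).getD [])) (j : Int) :=
        fun h => hr ((hbatch (j : Int)).mpr (Or.inr h))
      have hj' : j < p.1.length := by rwa [hlenp]
      rw [(hcell' j hj').2 hn2]
      exact (hpaint j hj).2 hn1


theorem dfsGo_spec (adj : List (List Int)) (n c : Int) (ha : GoodAdj adj n) (hc : c ≠ 0) :
    ∀ (fuel : Nat) (es color : List Int), color.length = n.toNat → GoodW n es →
      pvZeros color ≤ fuel →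
    FloodSpec adj c color es (dfsGo adj c fuel es color) := by
  intro fuel es color
  induction fuel, es, color using dfsGo.induct adj c with
  | case1 fuel color =>
    intro hlen hes hf
    rw [dfsGo]
    exact ⟨rfl, fun j hj => ⟨fun hr => (Rch_nil hr).elim, fun _ => rfl⟩⟩
  | case2 e rest color hu =>
    intro hlen hes hf
    exact absurd hf (by have := pvZeros_pos hu; omega)
  | case3 e rest color f hu ih1 ih2 =>
    intro hlen hes hf
    have he := hes e List.mem_cons_self
    have hrest : GoodW n rest := fun x hx => hes x (List.mem_cons_of_mem e hx)
    have hnb : GoodW n ((PySem.List.pyGet? adj e).getD []) := goodAdj_nbrs ha he.1 he.2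
    have hsing : GoodW n [e] := by
      intro x hx; rcases List.mem_singleton.mp hx with rfl; exact he
    have hel : e.toNat < color.length := by
      rw [PySem.List.pyGet?_of_nonneg color he.1] at hu
      exact (List.getElem?_eq_some_iff.mp hu).1
    have hlensetc : (PySem.List.pySetD color e c).length = color.length :=
      PySem.List.length_pySetD color e c
    have hlen₁ : (PySem.List.pySetD color e c).length = n.toNat := by rw [hlensetc]; exact hlen
    have hz : pvZeros (PySem.List.pySetD color e c) + 1 = pvZeros color :=
      pvZeros_set color e c hc hu
    have S₁ := ih1 hlen₁ hnb (by omega)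
    have hzr := floodSpec_zeros hc S₁
    have S₂ := ih2 (by rw [S₁.1]; exact hlen₁) hrest (by omega)
    have hmem : ∀ x : Int, x ∈ [e] ↔ (x ∈ [e] ∧ PySem.List.pyGet? color x = some 0) := by
      intro x
      refine ⟨fun hx => ⟨hx, ?_⟩, And.left⟩
      rcases List.mem_singleton.mp hx with rfl
      exact hu
    have hpaint : ∀ j : Nat, j < color.length →
        (((j : Nat) : Int) ∈ [e] → (PySem.List.pySetD color e c)[j]? = some c) ∧
        (((j : Nat) : Int) ∉ [e] → (PySem.List.pySetD color e c)[j]? = color[j]?) := by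
      intro j hj
      constructor
      · intro hjm
        have hje : ((j : Nat) : Int) = e := List.mem_singleton.mp hjm
        have hje' : j = e.toNat := by omega
        subst hje'
        rw [PySem.List.pySetD_of_nonneg color c he.1]
        exact List.getElem?_set_self hel
      · intro hjm
        have hje : ((j : Nat) : Int) ≠ e := by simpa using hjm
        rw [PySem.List.pySetD_of_nonneg color c he.1, List.getElem?_set_ne (by omega)]
    have hbatch := batch_visit (c := c) hc ha hsing hrest hsing hlensetc hmem hpaint
    have hcomp := comp_iff (c := c) hc ha hnb hrest S₁
    -- membership congruence between the two candidate orders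
    have hcongr : ∀ x : Int,
        Rch adj (PySem.List.pySetD color e c)
          (rest ++ [e].flatMap (fun v => (PySem.List.pyGet? adj v).getD [])) x ↔
        Rch adj (PySem.List.pySetD color e c)
          ((PySem.List.pyGet? adj e).getD [] ++ rest) x := by
      intro x
      refine Rch_congr (fun y => ?_)
      simp only [List.flatMap_cons, List.flatMap_nil, List.append_nil, List.mem_append]
      exact or_comm
    have notRch : ∀ (st W : List Int) (j : Nat), st[j]? = some c → ¬ Rch adj st W (j : Int) := by
      intro st W j hst hr
      have h' := Rch_uncolored hr
      rw [PySem.List.pyGet?_of_nonneg st (by omega)] at h'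
      simp only [Int.toNat_natCast] at h'
      rw [hst] at h'
      exact hc (Option.some.inj h')
    rw [dfsGo]
    simp only [hu, if_true]
    obtain ⟨L₁, C₁⟩ := S₁
    obtain ⟨L₂, C₂⟩ := S₂
    refine ⟨by rw [L₂, L₁, hlensetc], fun j hj => ⟨fun hr => ?_, fun hr => ?_⟩⟩
    · have hr' : Rch adj color ([e] ++ rest) (j : Int) := by rwa [List.singleton_append]
      have hj₁ : j < (PySem.List.pySetD color e c).length := by rwa [hlensetc]
      have hjr : j < (dfsGo adj c f ((PySem.List.pyGet? adj e).getD [])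
          (PySem.List.pySetD color e c)).length := by rwa [L₁]
      rcases (hbatch (j : Int)).mp hr' with hjm | hjr'
      · -- the cell painted by the visit of e itself
        have hp : (PySem.List.pySetD color e c)[j]? = some c := (hpaint j hj).1 hjm
        have h1 : (dfsGo adj c f ((PySem.List.pyGet? adj e).getD [])
            (PySem.List.pySetD color e c))[j]? = some c := by
          rw [(C₁ j hj₁).2 (notRch _ _ j hp)]; exact hp
        rw [(C₂ j hjr).2 (notRch _ _ j h1)]
        exact h1
      · rcases (hcomp (j : Int)).mp ((hcongr (j : Int)).mp hjr') with hjn | hjn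
        · have h1 : (dfsGo adj c f ((PySem.List.pyGet? adj e).getD [])
              (PySem.List.pySetD color e c))[j]? = some c := (C₁ j hj₁).1 hjn
          rw [(C₂ j hjr).2 (notRch _ _ j h1)]
          exact h1
        · exact (C₂ j hjr).1 hjn
    · have hr' : ¬ Rch adj color ([e] ++ rest) (j : Int) := by rwa [List.singleton_append]
      have hj₁ : j < (PySem.List.pySetD color e c).length := by rwa [hlensetc]
      have hjr : j < (dfsGo adj c f ((PySem.List.pyGet? adj e).getD [])
          (PySem.List.pySetD color e c)).length := by rwa [L₁]
      have hn0 : ((j : Nat) : Int) ∉ [e] := fun h => hr' ((hbatch (j : Int)).mpr (Or.inl h))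
      have hn1 : ¬ Rch adj (PySem.List.pySetD color e c)
          ((PySem.List.pyGet? adj e).getD []) (j : Int) := fun h =>
        hr' ((hbatch (j : Int)).mpr (Or.inr ((hcongr (j : Int)).mpr
          ((hcomp (j : Int)).mpr (Or.inl h)))))
      have hn2 : ¬ Rch adj (dfsGo adj c f ((PySem.List.pyGet? adj e).getD [])
          (PySem.List.pySetD color e c)) rest (j : Int) := fun h =>
        hr' ((hbatch (j : Int)).mpr (Or.inr ((hcongr (j : Int)).mpr
          ((hcomp (j : Int)).mpr (Or.inr h)))))
      rw [(C₂ j hjr).2 hn2, (C₁ j hj₁).2 hn1]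
      exact (hpaint j hj).2 hn0
  | case4 fuel e rest color v hv hvne ih =>
    intro hlen hes hf
    have hne : PySem.List.pyGet? color e ≠ some 0 := by
      rw [hv]; intro h; exact hvne (Option.some.inj h)
    have S := ih hlen (fun x hx => hes x (List.mem_cons_of_mem e hx)) hf
    rw [dfsGo.eq_def]
    simp only [hv, if_neg hvne]
    exact floodSpec_congr (fun x => (Rch_drop hne x).symm) S
  | case5 fuel e rest color hv ih =>
    intro hlen hes hf
    have hne : PySem.List.pyGet? color e ≠ some 0 := by rw [hv]; exact fun h => by cases h
    have S := ih hlen (fun x hx => hes x (List.mem_cons_of_mem e hx)) hf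
    rw [dfsGo.eq_def]
    simp only [hv]
    exact floodSpec_congr (fun x => (Rch_drop hne x).symm) S


theorem floodSpec_unique {adj : List (List Int)} {c : Int} {color W out₁ out₂ : List Int}
    (h₁ : FloodSpec adj c color W out₁) (h₂ : FloodSpec adj c color W out₂) : out₁ = out₂ := by
  obtain ⟨l₁, c₁⟩ := h₁
  obtain ⟨l₂, c₂⟩ := h₂
  refine List.ext_getElem? (fun i => ?_)
  by_cases hi : i < color.length
  · rcases Classical.em (Rch adj color W (i : Int)) with hr | hr
    · rw [(c₁ i hi).1 hr, (c₂ i hi).1 hr]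
    · rw [(c₁ i hi).2 hr, (c₂ i hi).2 hr]
  · have e₁ : out₁[i]? = none := by rw [List.getElem?_eq_none_iff]; omega
    have e₂ : out₂[i]? = none := by rw [List.getElem?_eq_none_iff]; omega
    rw [e₁, e₂]

-- the two outer scans agree step by step: on each fresh vertex both floods satisfy the
-- same FloodSpec, hence produce the same colour state
theorem outer_eq (adj : List (List Int)) (n : Int) (ha : GoodAdj adj n) :
    ∀ (l color : List Int) (cnt : Nat), (∀ i ∈ l, 0 ≤ i ∧ i < n) → color.length = n.toNat →
    bfsOuter adj l color cnt = bfsAltOuter adj n l color cnt := by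
  intro l
  induction l with
  | nil => intro color cnt _ _; rfl
  | cons i is ihl =>
    intro color cnt hl hlen
    have hi := hl i List.mem_cons_self
    have his : ∀ x ∈ is, 0 ≤ x ∧ x < n := fun x hx => hl x (List.mem_cons_of_mem i hx)
    rw [bfsOuter, bfsAltOuter]
    by_cases hcond : PySem.List.pyGetD color i 0 = 0
    · simp only [if_pos hcond]
      have hlen' : (PySem.List.pySetD color i ((cnt : Int) + 1)).length = n.toNat := by
        rw [PySem.List.length_pySetD]; exact hlen
      have hc : ((cnt : Int) + 1) ≠ 0 := by omega
      have SA := bfsLoop_spec adj n cnt ha [i]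
        (PySem.List.pySetD color i ((cnt : Int) + 1)) hlen'
        (fun x hx => by rcases List.mem_singleton.mp hx with rfl; exact hi)
      have SB := dfsGo_spec adj n ((cnt : Int) + 1) ha hc n.toNat
        ((PySem.List.pyGet? adj i).getD []) (PySem.List.pySetD color i ((cnt : Int) + 1))
        hlen' (goodAdj_nbrs ha hi.1 hi.2)
        (by rw [← hlen']; exact pvZeros_le_length _)
      -- the BFS candidate list [i].flatMap nbrs is the DFS candidate list nbrs i
      have hflat : ([i] : List Int).flatMap (fun s => (PySem.List.pyGet? adj s).getD []) =
          (PySem.List.pyGet? adj i).getD [] := by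
        simp
      rw [hflat] at SA
      have heq := floodSpec_unique SA SB
      rw [heq]
      exact ihl _ _ his (by rw [(SB.1 : _ = (PySem.List.pySetD color i ((cnt : Int) + 1)).length)]; exact hlen')
    · simp only [if_neg hcond]
      exact ihl color cnt his hlen

-- ===== VERDICT (by name: the statement is the Claim_ definition above) =====
theorem bfs_spec : Claim_equal_bfs := by
  intro adj n _ hpre
  unfold Spec_bfs bfs bfs_alt
  by_cases hn0 : n ≤ 0
  · rw [PySem.List.pyRange_one_eq_nil hn0]
    rfl
  · rcases hpre with hpre | ⟨h1, h2⟩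
    · exact absurd hpre hn0
    · refine outer_eq adj n ⟨h1, h2⟩ _ _ 0 ?_ (by simp)
      intro i hi
      have := PySem.List.mem_pyRange_one.mp hi
      omega
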